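-- pv_equiv track=rewrite | github.com/timothychangke/SC4023_Columnar_Database | data/validate.py | build_town_list
-- ===== SOURCE A (Python) =====
-- TOWN_MAP = {
--     0: "BEDOK",
--     1: "BUKIT PANJANG",
--     2: "CLEMENTI",
--     3: "CHOA CHU KANG",
--     4: "HOUGANG",
--     5: "JURONG WEST",
--     6: "PASIR RIS",
--     7: "TAMPINES",
--     8: "WOODLANDS",
--     9: "YISHUN",
-- }
--
-- def build_town_list(matric: str) -> list:
--     # extract unique digits to get the town list
--     seen = set()
--     towns = []
--     for c in matric:
--         if c.isdigit():
--             d = int(c)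
--             if d not in seen:
--                 seen.add(d)
--                 towns.append(TOWN_MAP[d])
--     return towns
-- ===== SOURCE B (Python) =====
-- TOWN_MAP = {
--     0: "BEDOK",
--     1: "BUKIT PANJANG",
--     2: "CLEMENTI",
--     3: "CHOA CHU KANG",
--     4: "HOUGANG",
--     5: "JURONG WEST",
--     6: "PASIR RIS",
--     7: "TAMPINES",
--     8: "WOODLANDS",
--     9: "YISHUN",
-- }
--
-- def build_town_list(matric: str) -> list:
--     # parse the digit characters, then dedup by repeated purging: take the
--     # leading digit, emit its town, and filter its later occurrences away.
--     digits = [int(c) for c in matric if c.isdigit()]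
--     towns = []
--     while digits:
--         d = digits[0]
--         towns.append(TOWN_MAP[d])
--         digits = [x for x in digits[1:] if x != d]
--     return towns
-- ===== Notes on version B (the rewrite author's own statement) =====
-- stated objective: alternative
-- what changed: Replaces A's single-pass seen-set dedup by a purge loop: first parse all digits, then repeatedly emit the town of the leading digit and filter every later occurrence of that digit out of the remaining list, so no auxiliary seen structure is kept.
import Mathlib
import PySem

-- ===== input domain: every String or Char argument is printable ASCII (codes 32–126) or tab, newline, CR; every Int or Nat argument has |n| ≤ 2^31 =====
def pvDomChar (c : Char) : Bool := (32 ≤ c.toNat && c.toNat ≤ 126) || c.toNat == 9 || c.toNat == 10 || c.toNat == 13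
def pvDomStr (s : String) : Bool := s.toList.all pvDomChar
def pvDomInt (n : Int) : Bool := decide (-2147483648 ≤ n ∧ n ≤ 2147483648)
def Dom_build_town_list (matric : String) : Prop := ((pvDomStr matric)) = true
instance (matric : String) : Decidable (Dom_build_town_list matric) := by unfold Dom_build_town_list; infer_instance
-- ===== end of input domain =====

-- B drops A's fused seen-set loop for a purge loop: parse digits first, then repeatedly emit the leading digit's town and filter its later occurrences away; alternative algorithm, same cost.


-- shared module constant TOWN_MAP
def townMap : PySem.Dict Int String :=
  PySem.Dict.ofList [(0, "BEDOK"), (1, "BUKIT PANJANG"), (2, "CLEMENTI"), (3, "CHOA CHU KANG"),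
    (4, "HOUGANG"), (5, "JURONG WEST"), (6, "PASIR RIS"), (7, "TAMPINES"), (8, "WOODLANDS"), (9, "YISHUN")]

-- int(c) for a single character (ValueError is unreachable here: on the admitted printable-ASCII
-- domain c.isdigit() holds only for '0'–'9', where int(c) returns normally)
def intOfChar (c : Char) : Int := (PySem.Int.ofChars? [c]).getD 0

-- TOWN_MAP[d] (KeyError is unreachable: d is a decimal digit value 0–9, a key of TOWN_MAP)
def townOf (d : Int) : String := townMap.getD d ""

-- ===== PORT A =====
def buildStep (st : PySem.Set Int × List String) (c : Char) : PySem.Set Int × List String :=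
  if PySem.Chars.isdigit c then
    let d := intOfChar c
    if ¬ (d ∈ st.1) then (PySem.Set.add st.1 d, st.2 ++ [townOf d]) else st
  else st

def build_town_list (matric : String) : List String :=
  (matric.toList.foldl buildStep (PySem.Set.empty, [])).2

-- ===== PORT B =====
-- the 'while digits:' loop of Source B: emit the head's town, purge its later occurrences
def purgeLoop (digits : List Int) (towns : List String) : List String :=
  match digits with
  | [] => towns
  | d :: rest => purgeLoop (rest.filter (fun x => x ≠ d)) (towns ++ [townOf d])
termination_by digits.length
decreasing_by
  simp only [List.length_cons, List.length_unattach]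
  exact Nat.lt_succ_of_le (le_trans (List.length_filter_le _ _) (by simp))

def build_town_list_alt (matric : String) : List String :=
  let digits := (matric.toList.filter (fun c => PySem.Chars.isdigit c)).map intOfChar
  purgeLoop digits []

-- ===== PRECONDITION & SPEC =====
def Spec_build_town_list (matric : String) (out : List String) : Prop := out = build_town_list_alt matric
instance (matric : String) (out : List String) : Decidable (Spec_build_town_list matric out) := by unfold Spec_build_town_list; infer_instance

-- ===== CLAIM (what is proved, stated in full; the proofs are below) =====
def Claim_equal_build_town_list : Prop := ∀ (matric : String), Dom_build_town_list matric → Spec_build_town_list matric (build_town_list matric)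

-- ===== LEMMAS AND PROOFS =====

theorem filter_discard (l : List Int) (d : Int) (p : Int → Bool) (hp : p d = false) :
    (PySem.Set.discard l d).filter p = l.filter p := by
  simp only [PySem.Set.discard, List.filter_filter]
  apply List.filter_congr
  intro y _
  by_cases hy : y = d <;> simp [hy, hp]

theorem filter_split (l : List Int) (s : PySem.Set Int) (d : Int) :
    l.filter (fun y => !decide (y ∈ s) && !decide (y = d))
      = (PySem.Set.discard l d).filter (fun y => !decide (y ∈ s)) := by
  simp only [PySem.Set.discard, List.filter_filter]
  apply List.filter_congr
  intro y _
  by_cases hy : y = d <;> simp [hy]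

theorem foldA_snd (cs : List Char) : ∀ (s : PySem.Set Int) (ts : List String),
    (cs.foldl buildStep (s, ts)).2
      = ts ++ (((PySem.Set.ofList ((cs.filter (fun c => PySem.Chars.isdigit c)).map intOfChar)).filter
          (fun d => !(PySem.Set.contains s d))).map townOf) := by
  induction cs with
  | nil => intro s ts; simp [PySem.Set.ofList_nil]
  | cons c cs ih =>
    intro s ts
    by_cases hd : PySem.Chars.isdigit c
    · simp only [List.foldl_cons, List.filter_cons_of_pos hd, List.map_cons,
        PySem.Set.ofList_cons, buildStep, hd, if_true]
      by_cases hmem : intOfChar c ∈ s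
      · simp [hmem, ih]
        rw [filter_discard _ _ _ (by simp [hmem])]
      · simp [hmem, ih]
        rw [filter_split]
    · simp [buildStep, hd, List.filter_cons_of_neg hd, ih]

-- set(l with d filtered out) = discard (set l) d
theorem ofList_filter_ne (l : List Int) (d : Int) :
    PySem.Set.ofList (l.filter (fun x => x ≠ d)) = PySem.Set.discard (PySem.Set.ofList l) d := by
  induction l with
  | nil => simp [PySem.Set.ofList_nil, PySem.Set.discard]
  | cons a l ih =>
    by_cases ha : a = d
    · subst ha
      rw [List.filter_cons_of_neg (by simp), ih]
      simp [PySem.Set.ofList_cons, PySem.Set.discard, List.filter_filter]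
    · rw [List.filter_cons_of_pos (by simp [ha]), PySem.Set.ofList_cons, ih,
        PySem.Set.ofList_cons]
      simp only [PySem.Set.discard, List.filter_filter]
      simp only [List.filter_cons, show ((!(a == d)) = true) from by simp [ha], if_true,
        List.filter_filter]
      congr 1
      exact List.filter_congr (fun y _ => by rw [Bool.and_comm])

-- the purge loop computes the towns of the first-occurrence digits, in order
theorem purge_eq (n : Nat) : ∀ (l : List Int), l.length ≤ n → ∀ (acc : List String),
    purgeLoop l acc = acc ++ (PySem.Set.ofList l).map townOf := by
  induction n with
  | zero =>
    intro l hl acc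
    have : l = [] := List.eq_nil_of_length_eq_zero (Nat.le_zero.mp hl)
    subst this
    simp [purgeLoop, PySem.Set.ofList_nil]
  | succ n ih =>
    intro l hl acc
    match l with
    | [] => simp [purgeLoop, PySem.Set.ofList_nil]
    | d :: rest =>
      rw [purgeLoop]
      have h1 := List.length_filter_le (fun x => decide (x ≠ d)) rest
      simp only [List.length_cons] at hl
      have hlen : (rest.filter (fun x => x ≠ d)).length ≤ n := by omega
      rw [ih _ hlen, ofList_filter_ne, PySem.Set.ofList_cons]
      simp

-- ===== VERDICT (by name: the statement is the Claim_ definition above) =====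
theorem build_town_list_spec : Claim_equal_build_town_list := by
  intro matric _
  unfold Spec_build_town_list build_town_list build_town_list_alt
  rw [foldA_snd, purge_eq ((matric.toList.filter (fun c => PySem.Chars.isdigit c)).map intOfChar).length _ le_rfl]
  simp [PySem.Set.empty, PySem.Set.contains]
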